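-- pv_equiv track=rewrite | github.com/mpresident14/Projects | Python/practice.py | sum10
-- ===== SOURCE A (Python) =====
-- def sum10(L):
--     pairs = []
--     for i in range(len(L)):
--         for j in range(len(L)):
--             if i != j:
--                 if L[i] + L[j] == 10:
--                     pairs.append([L[i], L[j]])
--
--     return pairs
-- ===== SOURCE B (Python) =====
-- def sum10(L):
--     counts = {}
--     for x in L:
--         counts[x] = counts.get(x, 0) + 1
--     pairs = []
--     for x in L:
--         k = counts.get(10 - x, 0) - (1 if x == 5 else 0)
--         pairs.extend([x, 10 - x] for _ in range(k))
--     return pairs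
-- ===== Notes on version B (the rewrite author's own statement) =====
-- stated objective: faster
-- what changed: Replaced the nested all-pairs index scan by a single counting pass: a value->count dict is built once, then one pass emits count(10-x) (minus the self-pair) copies of [x, 10-x] per element, in the same order.
import Mathlib
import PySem

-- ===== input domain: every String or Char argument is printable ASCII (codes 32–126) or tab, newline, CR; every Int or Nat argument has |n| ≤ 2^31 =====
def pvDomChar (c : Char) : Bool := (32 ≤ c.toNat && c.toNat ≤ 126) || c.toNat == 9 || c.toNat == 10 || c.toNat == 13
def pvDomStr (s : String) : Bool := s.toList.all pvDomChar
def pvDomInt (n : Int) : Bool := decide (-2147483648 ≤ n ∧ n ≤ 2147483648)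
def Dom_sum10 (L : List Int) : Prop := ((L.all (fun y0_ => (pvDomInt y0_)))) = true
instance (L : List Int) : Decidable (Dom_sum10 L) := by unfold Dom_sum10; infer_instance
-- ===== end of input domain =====

-- B replaces A's nested all-pairs scan by one counting dict plus one emitting pass (asymptotically faster).

-- ===== PORT A =====
def sum10 (L : List Int) : List (List Int) :=
  (PySem.List.pyRange 0 (PySem.List.len L)).foldl (fun pairs i =>
    (PySem.List.pyRange 0 (PySem.List.len L)).foldl (fun pairs j =>
      if i ≠ j then
        if PySem.List.pyGetD L i 0 + PySem.List.pyGetD L j 0 = 10 then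
          pairs ++ [[PySem.List.pyGetD L i 0, PySem.List.pyGetD L j 0]]
        else pairs
      else pairs) pairs) []

-- ===== PORT B =====
def sum10_alt (L : List Int) : List (List Int) :=
  let counts := L.foldl (fun d x => d.modify x 0 (fun v => v + 1)) (PySem.Dict.empty : PySem.Dict Int Int)
  L.foldl (fun pairs x =>
    pairs ++ List.replicate (counts.getD (10 - x) 0 - (if x = 5 then 1 else 0)).toNat [x, 10 - x]) []

-- ===== PRECONDITION & SPEC =====
def Spec_sum10 (L : List Int) (out : List (List Int)) : Prop := out = sum10_alt L
instance (L : List Int) (out : List (List Int)) : Decidable (Spec_sum10 L out) := by unfold Spec_sum10; infer_instance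

-- ===== CLAIM (what is proved, stated in full; the proofs are below) =====
def Claim_equal_sum10 : Prop := ∀ (L : List Int), Dom_sum10 L → Spec_sum10 L (sum10 L)

-- ===== LEMMAS AND PROOFS =====

-- the common normal form both programs compute
def pvGamma (L : List Int) (x : Int) : List (List Int) :=
  List.replicate ((↑(L.count (10 - x)) - (if x = 5 then (1:Int) else 0)).toNat) [x, 10 - x]

theorem countP_range_count (L : List Int) (v : Int) :
    (List.range L.length).countP (fun k => decide (L.getD k 0 = v)) = L.count v := by
  induction L with
  | nil => simp
  | cons x L ih =>
    rw [List.length_cons, List.range_succ_eq_map, List.countP_cons, List.countP_map]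
    have hcomp : ((fun k => decide ((x :: L).getD k 0 = v)) ∘ (fun k => k + 1))
        = fun k => decide (L.getD k 0 = v) := by
      funext k; simp
    rw [hcomp, ih, List.count_cons]
    by_cases h : x = v <;> simp [h]

theorem countP_range_ne (n it : Nat) (hit : it < n) (Q : Nat → Bool) :
    (List.range n).countP (fun k => decide (k ≠ it) && Q k)
      = (List.range n).countP Q - (if Q it then 1 else 0) := by
  induction n with
  | zero => omega
  | succ n ih =>
    rw [List.range_succ, List.countP_append, List.countP_append]
    rcases Nat.lt_or_ge it n with h | h
    · have hQpos : Q it = true → 0 < (List.range n).countP Q :=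
        fun hq => List.countP_pos_iff.mpr ⟨it, by simpa using h, hq⟩
      have h1 : List.countP (fun k => decide (k ≠ it) && Q k) [n] = List.countP Q [n] := by
        simp [List.countP_cons, show n ≠ it by omega]
      have h2 : List.countP Q [n] ≤ 1 := by
        simp only [List.countP_cons, List.countP_nil]; split <;> omega
      rw [ih h, h1]
      by_cases hq : Q it
      · have := hQpos hq; simp only [hq, if_true]; omega
      · simp [hq]
    · have hn : it = n := by omega
      subst hn
      have hcong : (List.range it).countP (fun k => decide (k ≠ it) && Q k)
          = (List.range it).countP Q := by
        apply List.countP_congr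
        intro k hk
        have hk' : k < it := List.mem_range.mp hk
        simp [show k ≠ it by omega]
      rw [hcong]
      have h3 : List.countP (fun k => decide (k ≠ it) && Q k) [it] = 0 := by
        simp
      have h4 : List.countP Q [it] = if Q it then 1 else 0 := by
        simp [List.countP_cons]
      rw [h3, h4]
      omega

theorem flatMap_congr_mem {α β : Type} (l : List α) (f g : α → List β)
    (h : ∀ x ∈ l, f x = g x) : l.flatMap f = l.flatMap g := by
  induction l with
  | nil => rfl
  | cons x l ih =>
    simp only [List.flatMap_cons, h x (List.mem_cons_self), ih (fun y hy => h y (List.mem_cons_of_mem x hy))]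

theorem map_filter_eq_replicate {α β : Type} (l : List α) (p : α → Bool) (f : α → β) (c : β)
    (h : ∀ x ∈ l, p x = true → f x = c) :
    (l.filter p).map f = List.replicate ((l.filter p).length) c := by
  have : ∀ x ∈ l.filter p, f x = c := by
    intro x hx
    exact h x (List.mem_of_mem_filter hx) (List.of_mem_filter hx)
  calc (l.filter p).map f = (l.filter p).map (fun _ => c) := List.map_congr_left this
    _ = List.replicate ((l.filter p).length) c := by
        induction (l.filter p) with
        | nil => rfl
        | cons y t ih2 => simp [List.replicate_succ, ih2]

-- B equals the normal form
theorem alt_eq_gamma (L : List Int) : sum10_alt L = L.flatMap (pvGamma L) := by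
  show (L.foldl (fun pairs x =>
      pairs ++ List.replicate
        (((L.foldl (fun d x => d.modify x 0 (fun v => v + 1)) (PySem.Dict.empty : PySem.Dict Int Int)).getD (10 - x) 0
          - (if x = 5 then 1 else 0)).toNat) [x, 10 - x]) []) = L.flatMap (pvGamma L)
  rw [PySem.List.foldl_append_eq_flatMap, List.nil_append]
  apply flatMap_congr_mem
  intro x _
  rw [PySem.Dict.getD_foldl_modify_add_one]
  simp [pvGamma, PySem.Dict.getD, PySem.Dict.empty, PySem.Dict.get?]

-- A's inner loop for a valid index i produces exactly pvGamma L (L[i])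
theorem inner_eq_gamma (L : List Int) (i : Int) (h0 : 0 ≤ i) (h1 : i < (L.length : Int)) :
    ((PySem.List.pyRange 0 (PySem.List.len L)).filter
        (fun j => decide (i ≠ j) && decide (PySem.List.pyGetD L i 0 + PySem.List.pyGetD L j 0 = 10))).map
      (fun j => [PySem.List.pyGetD L i 0, PySem.List.pyGetD L j 0])
    = pvGamma L (PySem.List.pyGetD L i 0) := by
  set a := PySem.List.pyGetD L i 0 with ha
  rw [map_filter_eq_replicate _ _ _ ([a, 10 - a])
    (by
      intro j hj hp
      simp only [Bool.and_eq_true, decide_eq_true_eq] at hp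
      have : PySem.List.pyGetD L j 0 = 10 - a := by omega
      rw [this])]
  unfold pvGamma
  congr 1
  rw [← List.countP_eq_length_filter]
  -- move to Nat range
  have hn : PySem.List.len L = ((L.length : Nat) : Int) := by
    simp [PySem.List.len]
  rw [hn, PySem.List.pyRange_zero_natCast, List.countP_map]
  have hgetD : ∀ k : Nat, k < L.length → PySem.List.pyGetD L (↑k) 0 = L.getD k 0 := by
    intro k hk
    rw [PySem.List.pyGetD_eq_getElem L 0 (by positivity) (by exact_mod_cast hk)]
    simp [List.getD_eq_getElem?_getD, List.getElem?_eq_getElem hk]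
  have hEqQ : (List.range L.length).countP
        ((fun j => decide (i ≠ j) && decide (a + PySem.List.pyGetD L j 0 = 10)) ∘ (fun k : Nat => (k : Int)))
      = (List.range L.length).countP
        (fun k => decide (k ≠ i.toNat) && decide (L.getD k 0 = 10 - a)) := by
    apply List.countP_congr
    intro k hk
    have hk' : k < L.length := List.mem_range.mp hk
    simp only [Function.comp_apply, Bool.and_eq_true, decide_eq_true_eq, hgetD k hk']
    constructor <;> intro ⟨hx, hy⟩ <;> exact ⟨by omega, by omega⟩
  rw [hEqQ, countP_range_ne L.length i.toNat (by omega) _, countP_range_count]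
  have hQit : (decide (L.getD i.toNat 0 = 10 - a)) = decide (a = 5) := by
    have h5 : L.getD i.toNat 0 = a := by
      have := hgetD i.toNat (by omega)
      rw [show ((i.toNat : Nat) : Int) = i by omega] at this
      rw [← ha] at this; omega
    rw [h5]
    by_cases h : a = 5
    · simp [h]
    · simp [h]
      omega
  rw [hQit]
  by_cases h : a = 5 <;> simp [h]

-- A equals the normal form
theorem a_eq_gamma (L : List Int) : sum10 L = L.flatMap (pvGamma L) := by
  unfold sum10
  have hbody : ∀ (pairs : List (List Int)) (i : Int),
      (PySem.List.pyRange 0 (PySem.List.len L)).foldl (fun pairs j =>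
        if i ≠ j then
          if PySem.List.pyGetD L i 0 + PySem.List.pyGetD L j 0 = 10 then
            pairs ++ [[PySem.List.pyGetD L i 0, PySem.List.pyGetD L j 0]]
          else pairs
        else pairs) pairs
      = pairs ++ ((PySem.List.pyRange 0 (PySem.List.len L)).filter
          (fun j => decide (i ≠ j) && decide (PySem.List.pyGetD L i 0 + PySem.List.pyGetD L j 0 = 10))).map
          (fun j => [PySem.List.pyGetD L i 0, PySem.List.pyGetD L j 0]) := by
    intro pairs i
    rw [← PySem.List.foldl_append_if
      (fun j => decide (i ≠ j) && decide (PySem.List.pyGetD L i 0 + PySem.List.pyGetD L j 0 = 10))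
      (fun j => [PySem.List.pyGetD L i 0, PySem.List.pyGetD L j 0])]
    apply PySem.List.foldl_congr_mem
    intro acc j _
    by_cases h1 : i ≠ j <;> by_cases h2 : PySem.List.pyGetD L i 0 + PySem.List.pyGetD L j 0 = 10 <;>
      simp [h1, h2]
  have hfold : ∀ (init : List (List Int)),
      (PySem.List.pyRange 0 (PySem.List.len L)).foldl (fun pairs i =>
        (PySem.List.pyRange 0 (PySem.List.len L)).foldl (fun pairs j =>
          if i ≠ j then
            if PySem.List.pyGetD L i 0 + PySem.List.pyGetD L j 0 = 10 then
              pairs ++ [[PySem.List.pyGetD L i 0, PySem.List.pyGetD L j 0]]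
            else pairs
          else pairs) pairs) init
      = init ++ (PySem.List.pyRange 0 (PySem.List.len L)).flatMap (fun i =>
          ((PySem.List.pyRange 0 (PySem.List.len L)).filter
            (fun j => decide (i ≠ j) && decide (PySem.List.pyGetD L i 0 + PySem.List.pyGetD L j 0 = 10))).map
            (fun j => [PySem.List.pyGetD L i 0, PySem.List.pyGetD L j 0])) := by
    intro init
    rw [← PySem.List.foldl_append_eq_flatMap]
    apply PySem.List.foldl_congr_mem
    intro acc i _
    exact hbody acc i
  rw [hfold, List.nil_append]
  have hmemγ : ∀ i ∈ PySem.List.pyRange 0 (PySem.List.len L),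
      ((PySem.List.pyRange 0 (PySem.List.len L)).filter
        (fun j => decide (i ≠ j) && decide (PySem.List.pyGetD L i 0 + PySem.List.pyGetD L j 0 = 10))).map
        (fun j => [PySem.List.pyGetD L i 0, PySem.List.pyGetD L j 0])
      = (pvGamma L) (PySem.List.pyGetD L i 0) := by
    intro i hi
    have := PySem.List.mem_pyRange_one.mp hi
    exact inner_eq_gamma L i (by omega) (by simpa [PySem.List.len] using this.2)
  rw [flatMap_congr_mem _ _ _ hmemγ]
  have : (PySem.List.pyRange 0 (PySem.List.len L)).flatMap (fun i => pvGamma L (PySem.List.pyGetD L i 0))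
      = ((PySem.List.pyRange 0 (PySem.List.len L)).map (fun i => PySem.List.pyGetD L i 0)).flatMap (pvGamma L) := by
    rw [List.flatMap_map]
  rw [this, PySem.List.map_pyGetD_pyRange_zero]

-- ===== VERDICT (by name: the statement is the Claim_ definition above) =====
theorem sum10_spec : Claim_equal_sum10 := by
  intro L _
  unfold Spec_sum10
  rw [a_eq_gamma, alt_eq_gamma]
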